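-- pv_equiv track=rewrite | github.com/AnWang-AI/AugABSA | scripts/text2data/data_utils.py | get_parallel_data_from_text_quads
-- ===== SOURCE A (Python) =====
-- from itertools import permutations
--
-- sentword2opinion = {'positive': 'great', 'negative': 'bad', 'neutral': 'ok'}
--
-- def get_parallel_data_from_text_quads(texts, quads_list):
--
--     def quads_to_target_permute(quads):
--
--         all_quads_sentences_list = []
--
--         for quad in quads:
--             permuted_quad_sentences = []
--             ac, at, ot, sp = quad
--
--             man_ot = sentword2opinion[sp]  # 'POS' -> 'good'
--
--             if at == 'NULL':
--                 at = 'it'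
--
--             if ot == 'NULL':
--                 ot = 'it'
--
--             quad_list = [f"[AT] {at}", f"[OT] {ot}", f"[AC] {ac}", f"[SP] {man_ot}"]
--
--             quad_lists = permutations(quad_list)
--
--             for quad_list in quad_lists:
--                 one_quad_sentence = " ".join(quad_list)
--                 permuted_quad_sentences.append(one_quad_sentence)
--
--             all_quads_sentences_list.append(permuted_quad_sentences)
--
--         target_list = []
--         for i in range(24):
--             all_quad_sentence = [sentences[i] for sentences in all_quads_sentences_list]
--             target = ' [SSEP] '.join(all_quad_sentence)
--             target_list.append(target)
--         return target_list
--
--     new_source_list = []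
--     new_target_list = []
--     new_quads_list = []
--     for text, quads in zip(texts, quads_list):
--         target_list = quads_to_target_permute(quads)
--         for target in target_list:
--             new_source_list.append(text)
--             new_target_list.append(target)
--             new_quads_list.append(quads)
--
--     return new_source_list, new_target_list, new_quads_list
-- ===== SOURCE B (Python) =====
-- from itertools import permutations
--
-- sentword2opinion = {'positive': 'great', 'negative': 'bad', 'neutral': 'ok'}
--
-- def get_parallel_data_from_text_quads(texts, quads_list):
--     index_perms = list(permutations(range(4)))
--     new_source_list = []
--     new_target_list = []
--     new_quads_list = []
--     for text, quads in zip(texts, quads_list):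
--         bases = []
--         for ac, at, ot, sp in quads:
--             man_ot = sentword2opinion[sp]
--             bases.append([
--                 f"[AT] {'it' if at == 'NULL' else at}",
--                 f"[OT] {'it' if ot == 'NULL' else ot}",
--                 f"[AC] {ac}",
--                 f"[SP] {man_ot}",
--             ])
--         for p in index_perms:
--             target = ' [SSEP] '.join(' '.join(b[j] for j in p) for b in bases)
--             new_source_list.append(text)
--             new_target_list.append(target)
--             new_quads_list.append(quads)
--     return new_source_list, new_target_list, new_quads_list
-- ===== Notes on version B (the rewrite author's own statement) =====
-- stated objective: alternative
-- what changed: B loops over the 24 precomputed index orderings of (0,1,2,3) as the outer loop and joins each target directly from the per-quad 4-element base lists, eliminating A's per-quad 24-sentence matrix and its transposing range(24) pass; Pre_ excludes inputs where a processed quad's sentiment is not a key of sentword2opinion, on which both A and B raise KeyError.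
import Mathlib
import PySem

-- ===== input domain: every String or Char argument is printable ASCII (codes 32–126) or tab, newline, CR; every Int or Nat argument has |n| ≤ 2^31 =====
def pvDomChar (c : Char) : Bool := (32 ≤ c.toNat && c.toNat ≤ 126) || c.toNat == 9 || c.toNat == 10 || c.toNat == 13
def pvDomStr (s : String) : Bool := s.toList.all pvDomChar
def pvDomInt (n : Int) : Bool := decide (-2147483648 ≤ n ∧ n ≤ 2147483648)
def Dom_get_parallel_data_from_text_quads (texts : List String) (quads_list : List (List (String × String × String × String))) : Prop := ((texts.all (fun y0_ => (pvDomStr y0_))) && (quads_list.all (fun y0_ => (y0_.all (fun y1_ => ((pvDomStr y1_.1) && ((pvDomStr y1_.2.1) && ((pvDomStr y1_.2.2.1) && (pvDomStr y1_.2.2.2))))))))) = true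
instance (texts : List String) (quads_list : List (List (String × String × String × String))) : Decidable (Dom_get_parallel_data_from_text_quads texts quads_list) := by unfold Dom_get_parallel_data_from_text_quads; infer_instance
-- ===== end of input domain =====

-- B replaces A's per-quad 24-permutation sentence matrix and its transposing range(24) pass by a
-- direct outer loop over the 24 index orderings of (0,1,2,3); same cost, different decomposition.

-- ===== PORT A =====
-- module constant sentword2opinion
def pv_sentword2opinion : PySem.Dict String String :=
  PySem.Dict.ofList [("positive", "great"), ("negative", "bad"), ("neutral", "ok")]

-- A's per-quad body: build quad_list, then the 24 permuted sentences (itertools.permutations)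
def pvQuadSentences (quad : String × String × String × String) : List String :=
  let ac := quad.1
  let at_ := quad.2.1
  let ot := quad.2.2.1
  let sp := quad.2.2.2
  -- sentword2opinion[sp]: KeyError when sp is absent — those inputs are excluded by Pre_
  let man_ot := (pv_sentword2opinion.get? sp).getD ""
  let at' := if at_ == "NULL" then "it" else at_
  let ot' := if ot == "NULL" then "it" else ot
  let quad_list := ["[AT] " ++ at', "[OT] " ++ ot', "[AC] " ++ ac, "[SP] " ++ man_ot]
  (PySem.List.permutations quad_list 4).map (fun ql => PySem.Str.join " " ql)

-- A's quads_to_target_permute: per-quad matrix, then the transposing loop over range(24)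
def pvQuadsToTargetPermute (quads : List (String × String × String × String)) : List String :=
  let all_quads_sentences_list := quads.map pvQuadSentences
  -- sentences[i]: every inner list has exactly 24 elements and i < 24, so getD is exact here
  (List.range 24).map (fun i =>
    PySem.Str.join " [SSEP] " (all_quads_sentences_list.map (fun sentences => sentences.getD i "")))

def get_parallel_data_from_text_quads (texts : List String) (quads_list : List (List (String × String × String × String))) : List String × List String × (List (List (String × String × String × String))) :=
  (texts.zip quads_list).foldl
    (fun st tq =>
      (pvQuadsToTargetPermute tq.2).foldl
        (fun st2 target => (st2.1 ++ [tq.1], st2.2.1 ++ [target], st2.2.2 ++ [tq.2])) st)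
    ([], [], [])

-- ===== PORT B =====
-- index_perms = list(permutations(range(4)))
def pvIndexPerms : List (List Int) :=
  PySem.List.permutations (PySem.List.pyRange 0 4 1) 4

-- B's per-quad 4-element base list
def pvQuadBase (quad : String × String × String × String) : List String :=
  let man_ot := (pv_sentword2opinion.get? quad.2.2.2).getD ""
  ["[AT] " ++ (if quad.2.1 == "NULL" then "it" else quad.2.1),
   "[OT] " ++ (if quad.2.2.1 == "NULL" then "it" else quad.2.2.1),
   "[AC] " ++ quad.1,
   "[SP] " ++ man_ot]

def get_parallel_data_from_text_quads_alt (texts : List String) (quads_list : List (List (String × String × String × String))) : List String × List String × (List (List (String × String × String × String))) :=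
  (texts.zip quads_list).foldl
    (fun st tq =>
      let bases := tq.2.map pvQuadBase
      pvIndexPerms.foldl
        (fun st2 p =>
          -- b[j]: j ∈ {0,1,2,3} and every base has 4 elements, pyGetD is exact here
          let target := PySem.Str.join " [SSEP] "
            (bases.map (fun b => PySem.Str.join " " (p.map (fun j => PySem.List.pyGetD b j ""))))
          (st2.1 ++ [tq.1], st2.2.1 ++ [target], st2.2.2 ++ [tq.2])) st)
    ([], [], [])

-- ===== PRECONDITION & SPEC =====
-- Pre_ excludes exactly the inputs where some quad actually iterated (zip truncates) carries a
-- sentiment outside sentword2opinion's keys: there A raises KeyError (and so does B).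
def Pre_get_parallel_data_from_text_quads (texts : List String) (quads_list : List (List (String × String × String × String))) : Prop :=
  ∀ quads ∈ quads_list.take texts.length, ∀ q ∈ quads,
    q.2.2.2 = "positive" ∨ q.2.2.2 = "negative" ∨ q.2.2.2 = "neutral"
instance (texts : List String) (quads_list : List (List (String × String × String × String))) : Decidable (Pre_get_parallel_data_from_text_quads texts quads_list) := by unfold Pre_get_parallel_data_from_text_quads; infer_instance

def pvWitness_get_parallel_data_from_text_quads : List String × (List (List (String × String × String × String))) :=
  (["tasty food"], [[("food quality", "food", "tasty", "positive")]])

def Spec_get_parallel_data_from_text_quads (texts : List String) (quads_list : List (List (String × String × String × String))) (out : List String × List String × (List (List (String × String × String × String)))) : Prop := out = get_parallel_data_from_text_quads_alt texts quads_list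
instance (texts : List String) (quads_list : List (List (String × String × String × String))) (out : List String × List String × (List (List (String × String × String × String)))) : Decidable (Spec_get_parallel_data_from_text_quads texts quads_list out) := by
  unfold Spec_get_parallel_data_from_text_quads
  exact @instDecidableEqProd _ _ inferInstance (@instDecidableEqProd _ _ inferInstance inferInstance) _ _

-- ===== CLAIM (what is proved, stated in full; the proofs are below) =====
def Claim_equal_get_parallel_data_from_text_quads : Prop := ∀ (texts : List String) (quads_list : List (List (String × String × String × String))), Dom_get_parallel_data_from_text_quads texts quads_list → Pre_get_parallel_data_from_text_quads texts quads_list → Spec_get_parallel_data_from_text_quads texts quads_list (get_parallel_data_from_text_quads texts quads_list)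

-- ===== LEMMAS AND PROOFS =====

-- B's rendering of one quad under one index ordering
def pvRender (p : List Int) (q : String × String × String × String) : String :=
  PySem.Str.join " " (p.map (fun j => PySem.List.pyGetD (pvQuadBase q) j ""))

theorem pvIndexPerms_eq : pvIndexPerms = [[0,1,2,3],[0,1,3,2],[0,2,1,3],[0,2,3,1],[0,3,1,2],[0,3,2,1],
   [1,0,2,3],[1,0,3,2],[1,2,0,3],[1,2,3,0],[1,3,0,2],[1,3,2,0],
   [2,0,1,3],[2,0,3,1],[2,1,0,3],[2,1,3,0],[2,3,0,1],[2,3,1,0],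
   [3,0,1,2],[3,0,2,1],[3,1,0,2],[3,1,2,0],[3,2,0,1],[3,2,1,0]] := by decide

-- A's 24 permuted sentences for one quad are exactly B's renders over the 24 index orderings
set_option maxHeartbeats 1000000 in
theorem pvL1 (q : String × String × String × String) :
    pvQuadSentences q = pvIndexPerms.map (fun p => pvRender p q) := by
  obtain ⟨ac, at_, ot, sp⟩ := q
  rw [pvIndexPerms_eq]
  simp [pvQuadSentences, pvRender, pvQuadBase, PySem.List.permutations,
    List.range_succ, List.eraseIdx, PySem.List.pyGetD]

-- reading a 24-element list back off by index over range 24 reproduces it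
theorem pvLrange (l : List String) (h : l.length = 24) :
    (List.range 24).map (fun i => l.getD i "") = l := by
  apply List.ext_getElem
  · simp [h]
  · intro k hk1 hk2
    simp only [List.getElem_map, List.getElem_range]
    rw [List.getD_eq_getElem]

-- two pointwise-agreeing maps may be consed pointwise
theorem pvMapCons {α β : Type} (as : List α) (bs : List β)
    (f1 : α → String) (g1 : β → String) (f2 : α → List String) (g2 : β → List String)
    (h1 : as.map f1 = bs.map g1) (h2 : as.map f2 = bs.map g2) :
    as.map (fun a => f1 a :: f2 a) = bs.map (fun b => g1 b :: g2 b) := by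
  have hlen : as.length = bs.length := by
    have := congrArg List.length h1; simpa using this
  apply List.ext_getElem
  · simp [hlen]
  · intro k hk1 hk2
    have e1 := congrArg (fun l => l[k]?) h1
    have e2 := congrArg (fun l => l[k]?) h2
    simp only [List.getElem?_map] at e1 e2
    simp only [List.getElem_map]
    simp only [List.length_map] at hk1 hk2
    rw [List.getElem?_eq_getElem hk1, List.getElem?_eq_getElem hk2] at e1 e2
    simp at e1 e2
    simp [e1, e2]

-- A's transpose of the per-quad matrix equals B's per-ordering row construction
theorem pvLkey (quads : List (String × String × String × String)) :
    (List.range 24).map (fun i => quads.map (fun q => (pvQuadSentences q).getD i "")) =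
      pvIndexPerms.map (fun p => quads.map (fun q => pvRender p q)) := by
  induction quads with
  | nil => decide
  | cons q qs ih =>
    simp only [List.map_cons]
    apply pvMapCons
    · rw [funext (fun i => congrArg (fun l => List.getD l i "") (pvL1 q))]
      have hlen : (pvIndexPerms.map (fun p => pvRender p q)).length = 24 := by
        rw [pvIndexPerms_eq]; simp
      exact pvLrange _ hlen
    · exact ih

-- per-text target lists coincide
theorem pvTargets (quads : List (String × String × String × String)) :
    pvQuadsToTargetPermute quads =
      pvIndexPerms.map (fun p => PySem.Str.join " [SSEP] " (quads.map (fun q => pvRender p q))) := by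
  unfold pvQuadsToTargetPermute
  have h := pvLkey quads
  calc (List.range 24).map (fun i => PySem.Str.join " [SSEP] " ((quads.map pvQuadSentences).map (fun s => s.getD i "")))
      = ((List.range 24).map (fun i => quads.map (fun q => (pvQuadSentences q).getD i ""))).map (PySem.Str.join " [SSEP] ") := by
        simp only [List.map_map]; rfl
    _ = (pvIndexPerms.map (fun p => quads.map (fun q => pvRender p q))).map (PySem.Str.join " [SSEP] ") := by rw [h]
    _ = _ := by simp only [List.map_map]; rfl

theorem pvMainEq (texts : List String) (quads_list : List (List (String × String × String × String))) :
    get_parallel_data_from_text_quads texts quads_list = get_parallel_data_from_text_quads_alt texts quads_list := by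
  unfold get_parallel_data_from_text_quads get_parallel_data_from_text_quads_alt
  apply PySem.List.foldl_congr_mem
  intro acc tq _
  rw [pvTargets tq.2, List.foldl_map]
  apply PySem.List.foldl_congr_mem
  intro acc2 p _
  simp only [List.map_map]
  rfl

-- ===== VERDICT (by name: the statement is the Claim_ definition above) =====
theorem get_parallel_data_from_text_quads_spec : Claim_equal_get_parallel_data_from_text_quads := by
  intro texts quads_list _ _
  unfold Spec_get_parallel_data_from_text_quads
  exact pvMainEq texts quads_list
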